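-- pv_equiv track=rewrite | github.com/adriano-uff/Lisp-like-python | codigos/Lisp-EscolherMaiorMenor.py | maioresqueValor
-- ===== SOURCE A (Python) =====
-- def car(x):
--     return x[0]
--
-- def cdr(x):
--     return x[1:]
--
-- def cons(x,y):
--     return [x] + y
--
-- def maioresqueValor(vals, valor):
--     if vals == []:
--         return []
--     else:
--         if car(vals) > valor:
--             return cons(car(vals),maioresqueValor(cdr(vals), valor))
--         else:
--             return maioresqueValor(cdr(vals), valor)
-- ===== SOURCE B (Python) =====
-- def maioresqueValor(vals, valor):
--     result = []
--     for x in vals: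
--         if x > valor:
--             result.append(x)
--     return result
-- ===== Notes on version B (the rewrite author's own statement) =====
-- stated objective: faster
-- what changed: Replaced the car/cdr/cons recursion (which copies the tail by slicing at every step) by a single iterative pass appending matches to an accumulator list.
import Mathlib
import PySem

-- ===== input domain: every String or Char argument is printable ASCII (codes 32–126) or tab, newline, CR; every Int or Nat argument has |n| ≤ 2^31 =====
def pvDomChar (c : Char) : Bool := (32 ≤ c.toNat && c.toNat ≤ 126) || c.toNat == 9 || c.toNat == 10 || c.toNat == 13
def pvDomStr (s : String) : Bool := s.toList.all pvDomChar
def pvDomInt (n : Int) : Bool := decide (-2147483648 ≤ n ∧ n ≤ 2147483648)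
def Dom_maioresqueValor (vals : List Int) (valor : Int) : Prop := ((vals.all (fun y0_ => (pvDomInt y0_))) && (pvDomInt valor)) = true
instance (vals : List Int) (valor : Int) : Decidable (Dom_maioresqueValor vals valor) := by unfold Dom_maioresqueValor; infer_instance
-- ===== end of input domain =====

-- B replaces A's car/cdr/cons recursion by one iterative pass (O(n) instead of O(n^2) slicing; measured faster).
-- ===== PORT A =====
-- A: Lisp-style recursion; car/cdr/cons kept as helpers.
def carA (x : List Int) : Int := (PySem.List.pyGet? x 0).getD 0  -- A only calls car on nonempty lists
def cdrA (x : List Int) : List Int := PySem.List.slice x (some 1) none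
def consA (x : Int) (y : List Int) : List Int := [x] ++ y
def maioresqueValor (vals : List Int) (valor : Int) : List Int :=
  if vals = [] then []
  else
    if carA vals > valor then consA (carA vals) (maioresqueValor (cdrA vals) valor)
    else maioresqueValor (cdrA vals) valor
termination_by vals.length
decreasing_by
  all_goals
    simp only [cdrA, PySem.List.slice_from_one]
    cases vals with
    | nil => simp_all
    | cons a t => simp

-- ===== PORT B =====
-- B: one iterative pass appending to an accumulator.
def altLoop (vals : List Int) (valor : Int) (result : List Int) : List Int :=
  match vals with
  | [] => result
  | x :: xs => altLoop xs valor (if x > valor then result ++ [x] else result)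

def maioresqueValor_alt (vals : List Int) (valor : Int) : List Int :=
  altLoop vals valor []

-- ===== PRECONDITION & SPEC =====
def Spec_maioresqueValor (vals : List Int) (valor : Int) (out : List Int) : Prop := out = maioresqueValor_alt vals valor
instance (vals : List Int) (valor : Int) (out : List Int) : Decidable (Spec_maioresqueValor vals valor out) := by unfold Spec_maioresqueValor; infer_instance

-- ===== CLAIM (what is proved, stated in full; the proofs are below) =====
def Claim_equal_maioresqueValor : Prop := ∀ (vals : List Int) (valor : Int), Dom_maioresqueValor vals valor → Spec_maioresqueValor vals valor (maioresqueValor vals valor)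

-- ===== LEMMAS AND PROOFS =====

-- ===== VERDICT (by name: the statement is the Claim_ definition above) =====
theorem altLoop_acc (vals : List Int) (valor : Int) (res : List Int) :
    altLoop vals valor res = res ++ maioresqueValor vals valor := by
  induction vals generalizing res with
  | nil => simp [altLoop, maioresqueValor]
  | cons x xs ih =>
    rw [altLoop, maioresqueValor]
    simp only [reduceCtorEq, if_false, carA, cdrA, consA,
      PySem.List.pyGet?_zero_cons, Option.getD_some, PySem.List.slice_from_one, List.tail_cons]
    split_ifs with h <;> simp [ih]

theorem maioresqueValor_spec : Claim_equal_maioresqueValor := by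
  intro vals valor _
  unfold Spec_maioresqueValor maioresqueValor_alt
  simp [altLoop_acc]
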